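-- pv_equiv track=rewrite | github.com/Skar0/simu | tests/coupons.py | make_classes
-- ===== SOURCE A (Python) =====
-- def make_classes(n, dataset):
--     """Goes sequentially trough the set of data, making sequences of numbers. Each sequence of number is increased in
--      size using the next available digit in the set of data until all possible digits appear at least once in the
--      sequence. The size of this sequence is then added an array. We thus obtain an array where at the position n is
--      n is stored the number of n-long sequences. We return the number of sequences and the array of classes. Number n
--      is the maximum number of classes. Returned array will have length n+1 and will contain all occurrences of sequence
--      length bigger than n"""
--
--     temp = [] # The array storing the unique digits already in the sequence
--     data = [] # The array in which the sequence is built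
--     length = [] # The array containing the classes
--     nbr = 0 # The number of built sequences
--
--
--     # Initially the list is empty
--     for i in range(n+1):
--         length.append(0)
--
--     for digit in dataset:
--         # For each digit in the dataset we add it to the current sequence
--         data.append(digit)
--
--         # If the digit was not already in the sequence, we add it to temp
--         if digit not in temp:
--             temp.append(digit)
--
--         # If temp length is 10, all ten digits are in the sequence, we need to add the length of the sequence
--         if len(temp) == 10:
--             # We have all digits, we reset the temp and data arrays
--             temp = []
--             i = len(data)
--             data = []
--
--             # If sequence length is smaller than the biggest allowed sequence length
--             if i <= n:
--                 # If sequence length is i, we increment length[i] and we increment nbr to signal we have one more sample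
--                 length[i] += 1
--                 nbr += 1
--             else:
--                 length[n] += 1
--                 nbr +=1
--     return nbr, length
-- ===== SOURCE B (Python) =====
-- def make_classes(n, dataset):
--     # Pass 1: for each position i, record prev[i] = index of the previous
--     # occurrence of dataset[i] (or -1). A digit is "new" for the run starting
--     # at `start` exactly when prev[i] < start, so pass 2 finds run boundaries
--     # with integer comparisons only, no per-run set at all.
--     last = {}
--     prev = []
--     for i, d in enumerate(dataset):
--         prev.append(last.get(d, -1))
--         last[d] = i
--     length = [0] * (n + 1)
--     nbr = 0
--     start = 0
--     k = 0
--     for i, p in enumerate(prev):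
--         if p < start:
--             k += 1
--             if k == 10:
--                 L = i + 1 - start
--                 length[L if L <= n else n] += 1
--                 nbr += 1
--                 start = i + 1
--                 k = 0
--     return nbr, length
-- ===== Notes on version B (the rewrite author's own statement) =====
-- stated objective: alternative
-- what changed: Instead of scanning with a per-run set of distinct digits, B first builds a previous-occurrence index prev[i] with one dict pass (prev[i] = index of the last earlier occurrence of dataset[i], or -1); a second pass detects run boundaries purely by the integer comparison prev[i] < start (a digit is new for the current run iff its previous occurrence predates the run start), so no set is ever built or reset.
import Mathlib
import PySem

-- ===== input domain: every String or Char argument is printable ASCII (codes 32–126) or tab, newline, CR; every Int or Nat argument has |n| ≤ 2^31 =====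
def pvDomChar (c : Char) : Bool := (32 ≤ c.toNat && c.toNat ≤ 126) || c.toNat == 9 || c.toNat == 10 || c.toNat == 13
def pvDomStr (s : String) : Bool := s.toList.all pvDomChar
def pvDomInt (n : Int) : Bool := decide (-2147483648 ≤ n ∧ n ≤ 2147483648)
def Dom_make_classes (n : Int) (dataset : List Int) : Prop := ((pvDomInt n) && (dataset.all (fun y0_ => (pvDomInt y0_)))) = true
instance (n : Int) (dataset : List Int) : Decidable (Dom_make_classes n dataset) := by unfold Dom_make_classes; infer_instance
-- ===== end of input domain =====

-- B replaces A's per-run distinct-digit set by a previous-occurrence index built in a first dict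
-- pass; run boundaries are then found by the integer test prev[i] < start. Objective: alternative
-- algorithm (no speed claim).

-- ===== PORT A =====
-- state: (temp, data, length, nbr)
def pvAStep (n : Int) (st : List Int × List Int × List Int × Int) (digit : Int) :
    List Int × List Int × List Int × Int :=
  let temp := st.1
  let data := st.2.1 ++ [digit]
  let length := st.2.2.1
  let nbr := st.2.2.2
  let temp := if digit ∈ temp then temp else temp ++ [digit]
  if temp.length = 10 then
    let i : Int := (data.length : Int)
    if i ≤ n then
      ([], [], PySem.List.pySetD length i (PySem.List.pyGetD length i 0 + 1), nbr + 1)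
    else
      ([], [], PySem.List.pySetD length n (PySem.List.pyGetD length n 0 + 1), nbr + 1)
  else (temp, data, length, nbr)

def make_classes (n : Int) (dataset : List Int) : Int × List Int :=
  let length0 : List Int := (PySem.List.pyRange 0 (n+1) 1).foldl (fun acc _ => acc ++ [(0 : Int)]) []
  let s := dataset.foldl (pvAStep n) ([], [], length0, 0)
  (s.2.2.2, s.2.2.1)

-- ===== PORT B =====
-- pass 1 state: (last, prev) — 'prev.append(last.get(d, -1)); last[d] = i'
def pvB1Step (st : PySem.Dict Int Int × List Int) (p : Int × Int) :
    PySem.Dict Int Int × List Int :=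
  (st.1.insert p.2 p.1, st.2 ++ [st.1.getD p.2 (-1)])

-- pass 2 state: (length, nbr, start, k)
def pvB2Step (n : Int) (st : List Int × Int × Int × Int) (ip : Int × Int) :
    List Int × Int × Int × Int :=
  let length := st.1
  let nbr := st.2.1
  let start := st.2.2.1
  let k := st.2.2.2
  if ip.2 < start then
    let k := k + 1
    if k = 10 then
      let L := ip.1 + 1 - start
      let idx := if L ≤ n then L else n
      (PySem.List.pySetD length idx (PySem.List.pyGetD length idx 0 + 1), nbr + 1, ip.1 + 1, 0)
    else (length, nbr, start, k)
  else st

def make_classes_alt (n : Int) (dataset : List Int) : Int × List Int :=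
  let prev := ((PySem.List.enumerate dataset 0).foldl pvB1Step (PySem.Dict.empty, [])).2
  let st := (PySem.List.enumerate prev 0).foldl (pvB2Step n)
      (PySem.List.pyRepeat [(0 : Int)] (n + 1), 0, 0, 0)
  (st.2.1, st.1)

-- ===== PRECONDITION & SPEC =====
-- Exactly the inputs on which the Python A returns: when n < 0 and the dataset holds at
-- least 10 distinct values, a run completes and A raises IndexError (negative index into
-- the empty histogram); B raises the same way there.
def Pre_make_classes (n : Int) (dataset : List Int) : Prop :=
  0 ≤ n ∨ (PySem.Set.ofList dataset).length < 10
instance (n : Int) (dataset : List Int) : Decidable (Pre_make_classes n dataset) := by unfold Pre_make_classes; infer_instance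
def pvWitness_make_classes : Int × List Int := (3, [0, 1, 2])

def Spec_make_classes (n : Int) (dataset : List Int) (out : Int × List Int) : Prop := out = make_classes_alt n dataset
instance (n : Int) (dataset : List Int) (out : Int × List Int) : Decidable (Spec_make_classes n dataset out) := by unfold Spec_make_classes; infer_instance

-- ===== CLAIM (what is proved, stated in full; the proofs are below) =====
def Claim_equal_make_classes : Prop := ∀ (n : Int) (dataset : List Int), Dom_make_classes n dataset → Pre_make_classes n dataset → Spec_make_classes n dataset (make_classes n dataset)

-- ===== LEMMAS AND PROOFS =====

-- reference one-pass segmentation used only as the proof's middle point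
-- state: (runs, seen, count)
def pvBStep (st : List Int × PySem.Set Int × Int) (digit : Int) : List Int × PySem.Set Int × Int :=
  let runs := st.1
  let seen := st.2.1
  let count := st.2.2 + 1
  let seen := PySem.Set.add seen digit
  if PySem.Set.len seen = 10 then (runs ++ [count], PySem.Set.empty, 0)
  else (runs, seen, count)

def pvTally (n : Int) (len : List Int) (L : Int) : List Int :=
  PySem.List.pySetD len (min L n) (PySem.List.pyGetD len (min L n) 0 + 1)

-- index of the last occurrence of d in l, or -1
def pvLastOcc (l : List Int) (d : Int) : Int :=
  (PySem.List.enumerate l 0).foldl (fun a jx => if jx.2 = d then jx.1 else a) (-1)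

-- the intended value of B's first pass
def pvPrevList (ds : List Int) : List Int :=
  ds.zipIdx.map (fun xi => pvLastOcc (ds.take xi.2) xi.1)

-- A's list-with-membership update of temp is exactly Python's set.add
lemma pvAdd_eq (temp : List Int) (digit : Int) :
    (if digit ∈ temp then temp else temp ++ [digit]) = PySem.Set.add temp digit := by
  by_cases h : digit ∈ temp <;> simp [PySem.Set.add, PySem.Set.contains, h]

-- A's two-branch histogram update is the single tally at min i n
lemma pvBranch_eq (n length : _) (i : Int) :
    (if i ≤ n then PySem.List.pySetD length i (PySem.List.pyGetD length i 0 + 1)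
     else PySem.List.pySetD length n (PySem.List.pyGetD length n 0 + 1))
      = pvTally n length i := by
  unfold pvTally
  rcases le_or_gt i n with h | h
  · simp [h]
  · simp [not_le.mpr h, min_eq_right (le_of_lt h)]

-- the loop invariant: A's fold, started from a state reached by the reference scan, projects to it
lemma pvLoop (n : Int) (len0 : List Int) :
    ∀ (ds seen data runs : List Int),
      (ds.foldl (pvAStep n) (seen, data, runs.foldl (pvTally n) len0, (runs.length : Int))).2.2
        = (((ds.foldl pvBStep (runs, seen, (data.length : Int))).1).foldl (pvTally n) len0,
           (((ds.foldl pvBStep (runs, seen, (data.length : Int))).1).length : Int)) := by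
  intro ds
  induction ds with
  | nil => intro seen data runs; rfl
  | cons d ds ih =>
    intro seen data runs
    have hstepA : pvAStep n (seen, data, runs.foldl (pvTally n) len0, (runs.length : Int)) d
        = if (PySem.Set.add seen d).length = 10 then
            ([], [], pvTally n (runs.foldl (pvTally n) len0) ((data.length : Int) + 1), (runs.length : Int) + 1)
          else (PySem.Set.add seen d, data ++ [d], runs.foldl (pvTally n) len0, (runs.length : Int)) := by
      simp only [pvAStep, pvAdd_eq, List.length_append, List.length_cons, List.length_nil,
        Nat.cast_add, Nat.cast_one, zero_add]
      rw [← pvBranch_eq]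
      split
      · split <;> rfl
      · rfl
    have hstepB : pvBStep (runs, seen, (data.length : Int)) d
        = if (PySem.Set.add seen d).length = 10 then (runs ++ [(data.length : Int) + 1], PySem.Set.empty, 0)
          else (runs, PySem.Set.add seen d, (data.length : Int) + 1) := by
      simp only [pvBStep, PySem.Set.len]
      split <;> split <;> first | rfl | omega
    simp only [List.foldl_cons, hstepA, hstepB]
    by_cases h : (PySem.Set.add seen d).length = 10
    · simp only [h, if_pos]
      have := ih PySem.Set.empty [] (runs ++ [(data.length : Int) + 1])
      simp only [List.foldl_append, List.foldl_cons, List.foldl_nil, List.length_append,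
        List.length_cons, List.length_nil] at this ⊢
      convert this using 3
    · simp only [h, if_neg, not_false_iff]
      have := ih (PySem.Set.add seen d) (data ++ [d]) runs
      simpa using this

-- A's length initialisation equals B's [0]*(n+1)
lemma pvInit_eq (n : Int) :
    (PySem.List.pyRange 0 (n+1) 1).foldl (fun acc _ => acc ++ [(0 : Int)]) []
      = List.replicate (n + 1).toNat (0 : Int) := by
  rw [show (fun (acc : List Int) (_ : Int) => acc ++ [(0 : Int)])
        = (fun acc x => acc ++ [(fun _ : Int => (0 : Int)) x]) from rfl,
     PySem.List.foldl_append_singleton_eq_map]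
  simp [PySem.List.pyRange_one, List.eq_replicate_iff]

-- snoc step of pvLastOcc
lemma pvLastOcc_snoc (l : List Int) (x d : Int) :
    pvLastOcc (l ++ [x]) d = if x = d then (l.length : Int) else pvLastOcc l d := by
  unfold pvLastOcc
  rw [PySem.List.enumerate_append, List.foldl_append]
  simp [PySem.List.enumerate]

-- bound on pvLastOcc
lemma pvLastOcc_lt (l : List Int) (d : Int) : pvLastOcc l d < (l.length : Int) ∨ pvLastOcc l d = -1 := by
  induction l using List.reverseRecOn with
  | nil => right; rfl
  | append_singleton l x ih =>
    rw [pvLastOcc_snoc]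
    rcases ih with h | h <;> (split <;> simp_all <;> omega)

-- membership through the previous-occurrence index
lemma pvLastOcc_lt_iff (l : List Int) (d : Int) (start : Nat) (hs : start ≤ l.length) :
    (pvLastOcc l d < (start : Int)) ↔ d ∉ l.drop start := by
  induction l using List.reverseRecOn with
  | nil =>
    simp [pvLastOcc, PySem.List.enumerate]
    omega
  | append_singleton l x ih =>
    rw [pvLastOcc_snoc]
    rcases Nat.lt_or_ge start (l.length + 1) with hlt | hge
    · have hs' : start ≤ l.length := by omega
      rw [List.drop_append_of_le_length hs']
      by_cases hx : x = d
      · simp only [hx]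
        constructor
        · intro h; exact absurd h (by push_cast; omega)
        · intro h; exact absurd (by simp) h
      · simp only [if_neg hx]
        rw [ih hs']
        constructor
        · intro h hmem
          rcases List.mem_append.mp hmem with h1 | h1
          · exact h h1
          · simp at h1; exact hx h1.symm
        · intro h h1; exact h (List.mem_append_left _ h1)
    · have hse : start = l.length + 1 := by simp at hs; omega
      subst hse
      rw [List.drop_of_length_le (by simp)]
      simp only [List.not_mem_nil, not_false_iff, iff_true]
      rcases pvLastOcc_lt l d with h | h
      · split <;> [push_cast; skip] <;> omega
      · split <;> [push_cast; rw [h]] <;> push_cast <;> omega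

-- the first pass computes pvPrevList, with the dict mapping each value to its last index
lemma pvPass1 (ds : List Int) :
    (((PySem.List.enumerate ds 0).foldl pvB1Step (PySem.Dict.empty, [])).2 = pvPrevList ds)
    ∧ (∀ d : Int,
        ((PySem.List.enumerate ds 0).foldl pvB1Step (PySem.Dict.empty, [])).1.getD d (-1)
          = pvLastOcc ds d) := by
  induction ds using List.reverseRecOn with
  | nil => exact ⟨rfl, fun d => rfl⟩
  | append_singleton l x ih =>
    rw [PySem.List.enumerate_append, List.foldl_append]
    simp only [PySem.List.enumerate, List.foldl_cons, List.foldl_nil]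
    constructor
    · show (_ : PySem.Dict Int Int × List Int).2 = _
      simp only [pvB1Step]
      rw [ih.1]
      have := ih.2 x
      unfold pvPrevList
      rw [List.zipIdx_append]
      simp only [List.map_append, List.zipIdx_cons, List.zipIdx_nil, List.map_cons, List.map_nil]
      congr 1
      · apply List.map_congr_left
        intro a ha
        have h2 := (List.mem_zipIdx ha).2.1
        rw [List.take_append_of_le_length (by omega)]
      · simp only [zero_add, List.take_left']
        rw [this]
    · intro d
      show (PySem.Dict.insert _ x _).getD d (-1) = _
      rw [pvLastOcc_snoc, PySem.Dict.getD_insert]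
      rcases eq_or_ne x d with hx | hx
      · subst hx; simp
      · rw [if_neg (fun h => hx h.symm), if_neg hx, ih.2 d]

-- Set.ofList over a snoc is Set.add
lemma pvOfList_snoc (l : List Int) (x : Int) :
    PySem.Set.ofList (l ++ [x]) = PySem.Set.add (PySem.Set.ofList l) x := by
  rw [PySem.Set.ofList_eq_foldl, PySem.Set.ofList_eq_foldl, List.foldl_append]
  rfl

-- core: pass 2 over the previous-occurrence index agrees with the reference scan
lemma pvCore (n : Int) (len0 : List Int) (ds : List Int) :
    ∀ (fuel i start : Nat) (runs : List Int),
      ds.length - i = fuel → start ≤ i → i ≤ ds.length →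
      (PySem.Set.ofList ((ds.drop start).take (i - start))).length < 10 →
      (let st := ((PySem.List.enumerate (pvPrevList ds) 0).drop i).foldl (pvB2Step n)
          (runs.foldl (pvTally n) len0, (runs.length : Int), (start : Int),
           ((PySem.Set.ofList ((ds.drop start).take (i - start))).length : Int));
        (st.1, st.2.1))
      = (let r := (ds.drop i).foldl pvBStep
          (runs, PySem.Set.ofList ((ds.drop start).take (i - start)), ((i - start : Nat) : Int));
        (r.1.foldl (pvTally n) len0, (r.1.length : Int))) := by
  intro fuel
  induction fuel with
  | zero =>
    intro i start runs hfuel hsi hil _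
    have hi : i = ds.length := by omega
    subst hi
    have h1 : (PySem.List.enumerate (pvPrevList ds) 0).drop ds.length = [] :=
      List.drop_of_length_le (by rw [PySem.List.length_enumerate]; simp [pvPrevList])
    have h2 : ds.drop ds.length = [] := List.drop_of_length_le le_rfl
    rw [h1, h2]
    rfl
  | succ fuel ih =>
    intro i start runs hfuel hsi hil hlen
    have hi : i < ds.length := by omega
    -- unfold one element on each side
    have hprevlen : (pvPrevList ds).length = ds.length := by
      simp [pvPrevList]
    have hPi : ∀ (h : i < (pvPrevList ds).length), (pvPrevList ds)[i]'h = pvLastOcc (ds.take i) ds[i] := by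
      intro h
      unfold pvPrevList
      simp [List.getElem_zipIdx]
    have hdropP : (PySem.List.enumerate (pvPrevList ds) 0).drop i
        = ((i : Int), pvLastOcc (ds.take i) ds[i]) :: (PySem.List.enumerate (pvPrevList ds) 0).drop (i + 1) := by
      rw [List.drop_eq_getElem_cons (by rw [PySem.List.length_enumerate, hprevlen]; exact hi)]
      congr 1
      rw [PySem.List.getElem_enumerate]
      rw [hPi (by omega)]
      simp
    have hdropD : ds.drop i = ds[i] :: ds.drop (i + 1) :=
      List.drop_eq_getElem_cons hi
    set seg := (ds.drop start).take (i - start) with hseg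
    set seen := PySem.Set.ofList seg with hseen
    -- the branch condition
    have hcond : (pvLastOcc (ds.take i) ds[i] < (start : Int)) ↔ ds[i] ∉ seg := by
      rw [pvLastOcc_lt_iff (ds.take i) ds[i] start (by rw [List.length_take]; omega)]
      rw [hseg, List.drop_take]
    -- segment extension
    have hsegext : (ds.drop start).take (i + 1 - start) = seg ++ [ds[i]] := by
      rw [hseg, show i + 1 - start = (i - start) + 1 by omega]
      rw [List.take_add_one]
      have hgd : (ds.drop start)[i - start]? = some ds[i] := by
        rw [List.getElem?_drop, show start + (i - start) = i from by omega]
        exact List.getElem?_eq_getElem hi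
      rw [hgd]
      simp
    rw [hdropP, hdropD]
    simp only [List.foldl_cons]
    by_cases hmem : ds[i] ∈ seg
    · -- old digit: both states unchanged up to the count
      have hB2 : pvB2Step n (runs.foldl (pvTally n) len0, (runs.length : Int), (start : Int),
          ((seen.length : Nat) : Int)) ((i : Int), pvLastOcc (ds.take i) ds[i])
          = (runs.foldl (pvTally n) len0, (runs.length : Int), (start : Int), ((seen.length : Nat) : Int)) := by
        simp only [pvB2Step]
        rw [if_neg (by rw [hcond]; simp [hmem])]
      have hadd : PySem.Set.add seen ds[i] = seen := by
        have hin : ds[i] ∈ seen := by rw [hseen]; exact (PySem.Set.mem_ofList _ _).mpr hmem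
        simp [PySem.Set.add, PySem.Set.contains, hin]
      have hBS : pvBStep (runs, seen, ((i - start : Nat) : Int)) ds[i]
          = (runs, seen, ((i + 1 - start : Nat) : Int)) := by
        simp only [pvBStep, hadd, PySem.Set.len]
        rw [if_neg (by omega)]
        congr 1
        congr 1
        omega
      rw [hB2, hBS]
      have hlen' : (PySem.Set.ofList ((ds.drop start).take (i + 1 - start))).length < 10 := by
        rw [hsegext, pvOfList_snoc, ← hseen, hadd]; exact hlen
      have := ih (i+1) start runs (by omega) (by omega) (by omega) hlen'
      simp only at this
      rw [hsegext, pvOfList_snoc, ← hseen, hadd] at this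
      exact this
    · -- new digit
      have hnotin : ds[i] ∉ seen := fun h => hmem ((PySem.Set.mem_ofList _ _).mp (hseen ▸ h))
      have haddlen : (PySem.Set.add seen ds[i]).length = seen.length + 1 := by
        simp [PySem.Set.add, PySem.Set.contains, hnotin]
      by_cases h10 : seen.length + 1 = 10
      · -- run completes
        have hB2 : pvB2Step n (runs.foldl (pvTally n) len0, (runs.length : Int), (start : Int),
            ((seen.length : Nat) : Int)) ((i : Int), pvLastOcc (ds.take i) ds[i])
            = (pvTally n (runs.foldl (pvTally n) len0) ((i : Int) + 1 - start),
               (runs.length : Int) + 1, (i : Int) + 1, 0) := by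
          simp only [pvB2Step]
          rw [if_pos (by rw [hcond]; exact hmem)]
          rw [if_pos (by omega)]
          rw [← pvBranch_eq]
          split <;> rfl
        have hBS : pvBStep (runs, seen, ((i - start : Nat) : Int)) ds[i]
            = (runs ++ [((i - start : Nat) : Int) + 1], PySem.Set.empty, 0) := by
          simp only [pvBStep, PySem.Set.len]
          rw [if_pos (by rw [haddlen]; omega)]
        rw [hB2, hBS]
        have := ih (i+1) (i+1) (runs ++ [((i - start : Nat) : Int) + 1]) (by omega) le_rfl (by omega)
          (by simp)
        simp only [Nat.sub_self, List.take_zero, PySem.Set.ofList_eq_foldl, List.foldl_append,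
          List.foldl_cons, List.foldl_nil, List.length_append, List.length_cons, List.length_nil,
          Nat.cast_zero] at this
        have harg : ((i - start : Nat) : Int) + 1 = (i : Int) + 1 - start := by omega
        rw [harg] at this
        rw [harg]
        exact this
      · -- run continues
        have hB2 : pvB2Step n (runs.foldl (pvTally n) len0, (runs.length : Int), (start : Int),
            ((seen.length : Nat) : Int)) ((i : Int), pvLastOcc (ds.take i) ds[i])
            = (runs.foldl (pvTally n) len0, (runs.length : Int), (start : Int),
               ((seen.length : Nat) : Int) + 1) := by
          simp only [pvB2Step]
          rw [if_pos (by rw [hcond]; exact hmem)]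
          rw [if_neg (by omega)]
        have hBS : pvBStep (runs, seen, ((i - start : Nat) : Int)) ds[i]
            = (runs, PySem.Set.ofList ((ds.drop start).take (i + 1 - start)), ((i + 1 - start : Nat) : Int)) := by
          simp only [pvBStep, PySem.Set.len]
          rw [if_neg (by rw [haddlen]; omega)]
          rw [hsegext, pvOfList_snoc, ← hseen]
          congr 1
          congr 1
          omega
        rw [hB2, hBS]
        have hlen' : (PySem.Set.ofList ((ds.drop start).take (i + 1 - start))).length < 10 := by
          rw [hsegext, pvOfList_snoc, ← hseen, haddlen]; omega
        have := ih (i+1) start runs (by omega) (by omega) (by omega) hlen'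
        simp only at this
        rw [hsegext, pvOfList_snoc, ← hseen] at this ⊢
        rw [haddlen] at this
        push_cast at this ⊢
        exact this

-- ===== VERDICT (by name: the statement is the Claim_ definition above) =====
theorem make_classes_spec : Claim_equal_make_classes := by
  intro n dataset _ _
  unfold Spec_make_classes make_classes make_classes_alt
  dsimp only
  rw [(pvPass1 dataset).1, PySem.List.pyRepeat_singleton]
  have hA := pvLoop n (List.replicate (n + 1).toNat (0 : Int)) dataset [] [] []
  simp only [List.foldl_nil, List.length_nil, Nat.cast_zero] at hA
  have hB := pvCore n (List.replicate (n + 1).toNat (0 : Int)) dataset dataset.length 0 0 []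
    (by omega) le_rfl (Nat.zero_le _) (by simp)
  simp only [List.drop_zero, List.take_zero, Nat.sub_zero, List.foldl_nil, List.length_nil,
    Nat.cast_zero] at hB
  rw [pvInit_eq, hA]
  rw [show PySem.Set.ofList ([] : List Int) = PySem.Set.empty from rfl] at hB
  exact (congrArg (fun p => (p.2, p.1)) hB).symm.trans rfl
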